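-- pv_equiv track=rewrite | github.com/SheldonHH/algorithm-journey | src/class070/C5_HouseRobberIV.py | most_rob3
-- ===== SOURCE A (Python) =====
-- def most_rob3(nums, ability):
--     ans = 0
--     i = 0
--     n = len(nums)
--     while i < n:
--         if nums[i] <= ability:
--             ans += 1
--             i += 1  # Skip the next house
--         i += 1
--     return ans
-- ===== SOURCE B (Python) =====
-- def most_rob3(nums, ability):
--     prev2 = prev1 = 0
--     for x in nums:
--         cur = max(prev1, prev2 + (1 if x <= ability else 0))
--         prev2, prev1 = prev1, cur
--     return prev1
-- ===== Notes on version B (the rewrite author's own statement) =====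
-- stated objective: alternative
-- what changed: Replaces the greedy take-and-skip index loop by a rolling two-scalar maximum-independent-set DP (prev2/prev1 with cur = max(prev1, prev2 + allowed)); the leftmost greedy is provably optimal for MIS on a path, so the counts coincide.
import Mathlib
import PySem

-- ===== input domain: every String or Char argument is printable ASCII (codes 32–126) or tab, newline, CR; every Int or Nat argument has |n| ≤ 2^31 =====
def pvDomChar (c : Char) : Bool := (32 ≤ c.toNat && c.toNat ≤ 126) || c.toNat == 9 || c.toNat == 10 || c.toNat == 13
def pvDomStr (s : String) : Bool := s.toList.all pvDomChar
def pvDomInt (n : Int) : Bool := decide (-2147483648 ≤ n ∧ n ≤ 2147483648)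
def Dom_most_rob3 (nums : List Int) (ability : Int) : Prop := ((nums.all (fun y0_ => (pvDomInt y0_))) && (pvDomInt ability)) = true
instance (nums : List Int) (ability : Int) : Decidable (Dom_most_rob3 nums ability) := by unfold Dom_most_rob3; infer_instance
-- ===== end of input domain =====

-- B replaces A's greedy take-and-skip scan by a rolling two-scalar MIS DP; same count, proved equal.

-- ===== PORT A =====
-- A's while loop over index i: on a hit, ans += 1 and i advances by 2 (skip next house),
-- otherwise i advances by 1; modelled as recursion on the remaining suffix.
def most_rob3_loop (ability : Int) : List Int → Int → Int
  | [], ans => ans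
  | x :: xs, ans =>
      if x ≤ ability then most_rob3_loop ability xs.tail (ans + 1)
      else most_rob3_loop ability xs ans
termination_by xs => xs.length
decreasing_by
  all_goals simp [List.length_tail]

def most_rob3 (nums : List Int) (ability : Int) : Int :=
  most_rob3_loop ability nums 0

-- ===== PORT B =====
def most_rob3_alt (nums : List Int) (ability : Int) : Int :=
  (nums.foldl
    (fun (s : Int × Int) x => (s.2, max s.2 (s.1 + (if x ≤ ability then 1 else 0))))
    (0, 0)).2

-- ===== PRECONDITION & SPEC =====
def Spec_most_rob3 (nums : List Int) (ability : Int) (out : Int) : Prop := out = most_rob3_alt nums ability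
instance (nums : List Int) (ability : Int) (out : Int) : Decidable (Spec_most_rob3 nums ability out) := by unfold Spec_most_rob3; infer_instance

-- ===== CLAIM (what is proved, stated in full; the proofs are below) =====
def Claim_equal_most_rob3 : Prop := ∀ (nums : List Int) (ability : Int), Dom_most_rob3 nums ability → Spec_most_rob3 nums ability (most_rob3 nums ability)

-- ===== LEMMAS AND PROOFS =====

-- the greedy count with accumulator 0
def greedy (a : Int) (xs : List Int) : Int := most_rob3_loop a xs 0

lemma loop_acc_aux (a : Int) : ∀ (n : Nat) (xs : List Int), xs.length = n →
    ∀ ans, most_rob3_loop a xs ans = ans + most_rob3_loop a xs 0 := by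
  intro n
  induction n using Nat.strong_induction_on with
  | _ n ih =>
    intro xs hlen ans
    match xs with
    | [] => simp [most_rob3_loop]
    | x :: t =>
      have hlt : t.tail.length < n := by
        simp at hlen; simp [List.length_tail]; omega
      have hlt' : t.length < n := by simp at hlen; omega
      by_cases hx : x ≤ a
      · simp only [most_rob3_loop, if_pos hx]
        rw [ih t.tail.length hlt t.tail rfl (ans + 1),
            ih t.tail.length hlt t.tail rfl (0 + 1)]
        ring
      · simp only [most_rob3_loop, if_neg hx]
        rw [ih t.length hlt' t rfl ans]

lemma loop_acc (a : Int) (xs : List Int) (ans : Int) :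
    most_rob3_loop a xs ans = ans + greedy a xs :=
  loop_acc_aux a xs.length xs rfl ans

lemma greedy_nil (a : Int) : greedy a [] = 0 := by simp [greedy, most_rob3_loop]

lemma greedy_cons (a x : Int) (xs : List Int) :
    greedy a (x :: xs) = if x ≤ a then 1 + greedy a xs.tail else greedy a xs := by
  simp only [greedy, most_rob3_loop]
  split
  · rw [loop_acc]; ring_nf; rfl
  · rfl

-- monotone/Lipschitz facts about the greedy count
lemma greedy_tail (a : Int) : ∀ xs : List Int,
    greedy a xs.tail ≤ greedy a xs ∧ greedy a xs ≤ 1 + greedy a xs.tail := by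
  intro xs
  induction xs with
  | nil => simp [greedy_nil]
  | cons x t ih =>
      rcases ih with ⟨ih1, ih2⟩
      simp only [List.tail_cons]
      rw [greedy_cons]
      constructor <;> split <;> omega

-- the DP fold, continued from a state (p2, p1), computes a max over greedy counts
lemma fold_dp (a : Int) : ∀ (s : List Int) (p2 p1 : Int), p2 ≤ p1 → p1 ≤ p2 + 1 →
    (s.foldl (fun (st : Int × Int) x => (st.2, max st.2 (st.1 + (if x ≤ a then 1 else 0)))) (p2, p1)).2
      = max (p2 + greedy a s) (p1 + greedy a s.tail) := by
  intro s
  induction s with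
  | nil => intro p2 p1 h1 h2; simp [greedy_nil]; omega
  | cons x t ih =>
      intro p2 p1 h1 h2
      have ht := greedy_tail a t
      simp only [List.foldl_cons, List.tail_cons]
      rw [ih p1 (max p1 (p2 + (if x ≤ a then 1 else 0))) (by split <;> omega)
            (by split <;> omega)]
      rw [greedy_cons]
      split <;> omega

-- ===== VERDICT (by name: the statement is the Claim_ definition above) =====
theorem most_rob3_spec : Claim_equal_most_rob3 := by
  intro nums ability _
  unfold Spec_most_rob3 most_rob3 most_rob3_alt
  rw [fold_dp ability nums 0 0 le_rfl (by omega)]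
  have := greedy_tail ability nums
  rw [← greedy]
  omega
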